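-- pv_equiv track=rewrite | github.com/hpmalinova/Hack-Bulgaria | week1/02. Dive Into Python/week1_2_solutions.py | numbers_to_message
-- ===== SOURCE A (Python) =====
-- def group(lst):
-- 	if not lst:
-- 		return []
--
-- 	result = []
-- 	curN = lst[0]
-- 	toAdd = []
-- 	for i in range(len(lst)):
-- 		if curN == lst[i]:
-- 			toAdd.append(curN)
-- 		else:
-- 			curN = lst[i]
-- 			result.append(toAdd)
-- 			toAdd = [curN]
-- 	if toAdd:
-- 		result.append(toAdd)
--
-- 	return result
--
-- def cut_command(command):
-- 	length = len(command)
-- 	if length > 4 and (command[0] == 7 or command[0] == 9):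
-- 		length = length % 4
-- 		command = command[:length]
-- 	elif length > 3 and command[0] != 7 and command[0] != 9:
-- 		length = length % 3
-- 		command = command[:length]
-- 	return command
--
-- letters = {1: True, 0: ' ' , 2: 'a', 22: 'b', 222: 'c', 3: 'd', 33: 'e', 333: 'f', 4: 'g',
-- 44: 'h', 444: 'i', 5: 'j', 55: 'k', 555: 'l', 6: 'm', 66: 'n', 666: 'o', 7: 'p', 77: 'q', 777: 'r',
-- 7777: 's', 8: 't', 88: 'u', 888: 'v', 9: 'w', 99: 'x', 999: 'y', 9999: 'z'}
--
-- def numbers_to_message(pressed_sequence):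
--     capitalize = False
--     commands = group(pressed_sequence) #
--     msg = []
--     for command in commands:
--     	if command == [1]:
--     		capitalize = True
--     	elif command != [-1]:
--     		command = cut_command(command)
--     		number = int(''.join(str(i) for i in command))
--     		letter = letters[number]
--     		if capitalize:
--     			letter = letter.upper()
--     			capitalize = False
--     		msg.append(letter)
--
--     return "".join(i for i in msg)
-- ===== SOURCE B (Python) =====
-- LETTERS = {0: ' ', 2: 'a', 22: 'b', 222: 'c', 3: 'd', 33: 'e', 333: 'f', 4: 'g',
--            44: 'h', 444: 'i', 5: 'j', 55: 'k', 555: 'l', 6: 'm', 66: 'n', 666: 'o',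
--            7: 'p', 77: 'q', 777: 'r', 7777: 's', 8: 't', 88: 'u', 888: 'v',
--            9: 'w', 99: 'x', 999: 'y', 9999: 'z'}
--
--
-- def numbers_to_message(pressed_sequence):
--     msg = []
--     capitalize = False
--     cur = None
--     count = 0
--
--     def flush():
--         nonlocal capitalize
--         if cur == 1 and count == 1:
--             capitalize = True
--             return
--         if cur == -1 and count == 1:
--             return
--         n = count
--         if n > 4 and (cur == 7 or cur == 9):
--             n %= 4
--         elif n > 3 and cur != 7 and cur != 9:
--             n %= 3
--         width = len(str(cur))
--         code = 0
--         for _ in range(n):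
--             code = code * 10 ** width + cur
--         letter = LETTERS[code]
--         if capitalize:
--             letter = letter.upper()
--             capitalize = False
--         msg.append(letter)
--
--     for x in pressed_sequence:
--         if count and x == cur:
--             count += 1
--         else:
--             if count:
--                 flush()
--             cur, count = x, 1
--     if count:
--         flush()
--     return ''.join(msg)
-- ===== Notes on version B (the rewrite author's own statement) =====
-- stated objective: alternative
-- what changed: B decodes in one streaming pass that keeps only the current run value and count (no intermediate list-of-groups, no per-group list slicing) and composes the letter code arithmetically instead of str-joining the digits and re-parsing with int().
import Mathlib
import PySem

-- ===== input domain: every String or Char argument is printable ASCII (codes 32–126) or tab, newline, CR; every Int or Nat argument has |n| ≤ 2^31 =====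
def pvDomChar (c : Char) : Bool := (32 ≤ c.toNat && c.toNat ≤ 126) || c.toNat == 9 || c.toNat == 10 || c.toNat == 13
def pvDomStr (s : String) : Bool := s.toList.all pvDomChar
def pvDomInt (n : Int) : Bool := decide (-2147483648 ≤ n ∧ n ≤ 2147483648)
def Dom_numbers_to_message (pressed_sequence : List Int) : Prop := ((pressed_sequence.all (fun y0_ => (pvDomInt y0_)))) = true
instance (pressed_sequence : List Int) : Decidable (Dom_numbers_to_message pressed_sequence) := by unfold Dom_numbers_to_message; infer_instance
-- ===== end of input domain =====

-- B is a single streaming pass (run value + count, no intermediate group list, letter code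
-- composed arithmetically instead of str-join + int): objective 'alternative'.

-- ===== PORT A =====
-- loop body of group's 'for i in range(len(lst))' (iterates over the elements lst[i]);
-- state = (curN, result, toAdd)
def pvGroupStep (s : Int × List (List Int) × List Int) (xi : Int) :
    Int × List (List Int) × List Int :=
  if s.1 == xi then (s.1, s.2.1, s.2.2 ++ [s.1])
  else (xi, s.2.1 ++ [s.2.2], [xi])

def pvGroup (lst : List Int) : List (List Int) :=
  match lst with
  | [] => []
  | x :: _ =>
    let s := lst.foldl pvGroupStep (x, [], [])
    if s.2.2 ≠ [] then s.2.1 ++ [s.2.2] else s.2.1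

def pvCutCommand (command : List Int) : List Int :=
  let length : Int := (command.length : Int)
  if length > 4 ∧ ((PySem.List.pyGet? command 0).getD 0 = 7 ∨ (PySem.List.pyGet? command 0).getD 0 = 9) then
    PySem.List.slice command none (some (PySem.Int.mod length 4))
  else if length > 3 ∧ (PySem.List.pyGet? command 0).getD 0 ≠ 7 ∧ (PySem.List.pyGet? command 0).getD 0 ≠ 9 then
    PySem.List.slice command none (some (PySem.Int.mod length 3))
  else command

-- Python's letters dict, minus the heterogeneous entry 1: True (a bool, not a str).  A
-- looks a number up only when the command is not [1]; under Pre_ the looked-up number is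
-- never 1, so the typed dict without that key is exact there (outside Pre_ A raises).
def pvLetters : PySem.Dict Int String := PySem.Dict.ofList
  [(0, " "), (2, "a"), (22, "b"), (222, "c"), (3, "d"), (33, "e"), (333, "f"), (4, "g"),
   (44, "h"), (444, "i"), (5, "j"), (55, "k"), (555, "l"), (6, "m"), (66, "n"), (666, "o"),
   (7, "p"), (77, "q"), (777, "r"), (7777, "s"), (8, "t"), (88, "u"), (888, "v"),
   (9, "w"), (99, "x"), (999, "y"), (9999, "z")]

-- loop body of the 'for command in commands' loop; state = (capitalize, msg).
-- KeyError / ValueError (int('')) are raises in Python: the .getD defaults never fire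
-- under Pre_numbers_to_message.
def pvStepA (s : Bool × List String) (command : List Int) : Bool × List String :=
  if command = [1] then (true, s.2)
  else if command ≠ [-1] then
    let command' := pvCutCommand command
    let number := (PySem.Int.ofStr? (PySem.Str.join "" (command'.map PySem.Int.toStr))).getD 0
    let letter := (pvLetters.get? number).getD ""
    if s.1 then (false, s.2 ++ [PySem.Str.upper letter])
    else (s.1, s.2 ++ [letter])
  else s

def numbers_to_message (pressed_sequence : List Int) : String :=
  let commands := pvGroup pressed_sequence
  let s := commands.foldl pvStepA (false, [])
  PySem.Str.join "" s.2

-- ===== PORT B =====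
-- Source B's LETTERS is the same table as A's letters minus the 1: True entry; the port
-- shares the one constant pvLetters instead of duplicating the literal.

-- Source B's flush(): returns the new (capitalize, msg).  10 ** width has width ≥ 1, so the
-- Nat exponent is exact; LETTERS[code] is a raise where the .getD default would fire.
def pvFlush (cur : Int) (count : Nat) (capitalize : Bool) (msg : List String) :
    Bool × List String :=
  if cur = 1 ∧ count = 1 then (true, msg)
  else if cur = -1 ∧ count = 1 then (capitalize, msg)
  else
    let n0 : Int := (count : Int)
    let n : Int := if n0 > 4 ∧ (cur = 7 ∨ cur = 9) then PySem.Int.mod n0 4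
      else if n0 > 3 ∧ cur ≠ 7 ∧ cur ≠ 9 then PySem.Int.mod n0 3
      else n0
    let width : Int := PySem.Str.len (PySem.Int.toStr cur)
    let code : Int := (PySem.List.pyRange 0 n 1).foldl (fun code _ => code * 10 ^ width.toNat + cur) 0
    let letter := (pvLetters.get? code).getD ""
    if capitalize then (false, msg ++ [PySem.Str.upper letter])
    else (capitalize, msg ++ [letter])

-- loop body of Source B's 'for x in pressed_sequence'; state = (cur, count, capitalize, msg);
-- the cur = None / count = 0 start is the count = 0 state (cur's dummy 0 is never read).
def pvStepB (s : Int × Nat × Bool × List String) (x : Int) :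
    Int × Nat × Bool × List String :=
  if s.2.1 ≠ 0 ∧ x == s.1 then (s.1, s.2.1 + 1, s.2.2)
  else if s.2.1 ≠ 0 then (x, 1, pvFlush s.1 s.2.1 s.2.2.1 s.2.2.2)
  else (x, 1, s.2.2)

def numbers_to_message_alt (pressed_sequence : List Int) : String :=
  let s := pressed_sequence.foldl pvStepB (0, 0, false, [])
  let msg := if s.2.1 ≠ 0 then (pvFlush s.1 s.2.1 s.2.2.1 s.2.2.2).2 else s.2.2.2
  PySem.Str.join "" msg

-- ===== PRECONDITION & SPEC =====
-- the length the modulo cap keeps for a run of n presses of value v (cut_command's rule)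
def pvCutLen (v : Int) (n : Nat) : Nat :=
  if 4 < n ∧ (v = 7 ∨ v = 9) then n % 4
  else if 3 < n ∧ v ≠ 7 ∧ v ≠ 9 then n % 3 else n

-- the (run value, kept length) pairs whose digit concatenation is a key of letters
def pvPairs : List (Int × Nat) :=
  [(0, 1), (0, 2), (0, 3),
   (2, 1), (2, 2), (2, 3), (3, 1), (3, 2), (3, 3), (4, 1), (4, 2), (4, 3),
   (5, 1), (5, 2), (5, 3), (6, 1), (6, 2), (6, 3), (8, 1), (8, 2), (8, 3),
   (7, 1), (7, 2), (7, 3), (7, 4), (9, 1), (9, 2), (9, 3), (9, 4),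
   (22, 1), (222, 1), (33, 1), (333, 1), (44, 1), (444, 1), (55, 1), (555, 1),
   (66, 1), (666, 1), (77, 1), (77, 2), (777, 1), (88, 1), (888, 1),
   (99, 1), (99, 2), (999, 1), (7777, 1), (9999, 1)]

-- the maximal runs (value, length) of the input — a shape description of the input
def pvRunsAux (cur : Int) (k : Nat) : List Int → List (Int × Nat)
  | [] => [(cur, k)]
  | x :: xs => if x = cur then pvRunsAux cur (k + 1) xs else (cur, k) :: pvRunsAux x 1 xs

def pvRuns : List Int → List (Int × Nat)
  | [] => []
  | x :: xs => pvRunsAux x 1 xs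

-- Pre_ = exactly the inputs where A returns normally: every maximal run is a single shift
-- press (value 1), a single skipped press (value -1), or a run whose kept length yields a
-- letters key; anywhere else A raises (KeyError / ValueError from int('') / TypeError at join).
def Pre_numbers_to_message (pressed_sequence : List Int) : Prop :=
  ∀ p ∈ pvRuns pressed_sequence,
    (p.1 = 1 ∧ p.2 = 1) ∨ (p.1 = -1 ∧ p.2 = 1) ∨ (p.1, pvCutLen p.1 p.2) ∈ pvPairs
instance (pressed_sequence : List Int) : Decidable (Pre_numbers_to_message pressed_sequence) := by
  unfold Pre_numbers_to_message; infer_instance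

def pvWitness_numbers_to_message : List Int := [1, 44, 444, 0, 9, 9, 9, 9]

def Spec_numbers_to_message (pressed_sequence : List Int) (out : String) : Prop := out = numbers_to_message_alt pressed_sequence
instance (pressed_sequence : List Int) (out : String) : Decidable (Spec_numbers_to_message pressed_sequence out) := by unfold Spec_numbers_to_message; infer_instance

-- ===== CLAIM (what is proved, stated in full; the proofs are below) =====
def Claim_equal_numbers_to_message : Prop := ∀ (pressed_sequence : List Int), Dom_numbers_to_message pressed_sequence → Pre_numbers_to_message pressed_sequence → Spec_numbers_to_message pressed_sequence (numbers_to_message pressed_sequence)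

-- ===== LEMMAS AND PROOFS =====

theorem pv_group_invariant (xs : List Int) :
    ∀ (cur : Int) (res : List (List Int)) (k : Nat), 1 ≤ k →
    (let s := xs.foldl pvGroupStep (cur, res, List.replicate k cur)
     if s.2.2 ≠ [] then s.2.1 ++ [s.2.2] else s.2.1)
      = res ++ (pvRunsAux cur k xs).map (fun p => List.replicate p.2 p.1) := by
  induction xs with
  | nil =>
    intro cur res k hk
    obtain ⟨m, rfl⟩ : ∃ m, k = m + 1 := ⟨k - 1, by omega⟩
    simp [pvRunsAux, List.replicate_succ]
  | cons x xs ih =>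
    intro cur res k hk
    obtain ⟨m, rfl⟩ : ∃ m, k = m + 1 := ⟨k - 1, by omega⟩
    simp only [List.foldl_cons, pvRunsAux]
    by_cases hx : x = cur
    · subst hx
      have hstep : pvGroupStep (x, res, List.replicate (m + 1) x) x
          = (x, res, List.replicate (m + 1 + 1) x) := by
        simp [pvGroupStep, List.replicate_succ' (n := m + 1)]
      rw [hstep, if_pos rfl]
      exact ih x res (m + 2) (by omega)
    · have hstep : pvGroupStep (cur, res, List.replicate (m + 1) cur) x
          = (x, res ++ [List.replicate (m + 1) cur], List.replicate 1 x) := by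
        simp [pvGroupStep, Ne.symm hx, List.replicate]
      rw [hstep, if_neg hx]
      rw [ih x (res ++ [List.replicate (m + 1) cur]) 1 (by omega)]
      simp

theorem pv_group_eq (lst : List Int) :
    pvGroup lst = (pvRuns lst).map (fun p => List.replicate p.2 p.1) := by
  cases lst with
  | nil => rfl
  | cons x xs =>
    show (let s := (x :: xs).foldl pvGroupStep (x, [], [])
          if s.2.2 ≠ [] then s.2.1 ++ [s.2.2] else s.2.1)
        = (pvRunsAux x 1 xs).map (fun p => List.replicate p.2 p.1)
    have hstep : pvGroupStep (x, ([] : List (List Int)), ([] : List Int)) x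
        = (x, [], List.replicate 1 x) := by simp [pvGroupStep, List.replicate]
    simp only [List.foldl_cons, hstep]
    exact pv_group_invariant xs x [] 1 (by omega)

theorem pv_stream_invariant (xs : List Int) :
    ∀ (cur : Int) (k : Nat) (cap : Bool) (msg : List String), 1 ≤ k →
    (let s := xs.foldl pvStepB (cur, k, cap, msg)
     if s.2.1 ≠ 0 then (pvFlush s.1 s.2.1 s.2.2.1 s.2.2.2).2 else s.2.2.2)
      = ((pvRunsAux cur k xs).foldl
           (fun (s : Bool × List String) p => pvFlush p.1 p.2 s.1 s.2) (cap, msg)).2 := by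
  induction xs with
  | nil =>
    intro cur k cap msg hk
    simp [pvRunsAux, Nat.pos_iff_ne_zero.mp hk]
  | cons x xs ih =>
    intro cur k cap msg hk
    simp only [List.foldl_cons, pvRunsAux]
    by_cases hx : x = cur
    · subst hx
      have hstep : pvStepB (x, k, cap, msg) x = (x, k + 1, cap, msg) := by
        simp [pvStepB, Nat.pos_iff_ne_zero.mp hk]
      rw [hstep, if_pos rfl]
      exact ih x (k + 1) cap msg (by omega)
    · have hstep : pvStepB (cur, k, cap, msg) x = (x, 1, pvFlush cur k cap msg) := by
        simp [pvStepB, Nat.pos_iff_ne_zero.mp hk, hx]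
      rw [hstep, if_neg hx]
      rw [ih x 1 (pvFlush cur k cap msg).1 (pvFlush cur k cap msg).2 (by omega)]
      simp

theorem pv_letters_agree : ∀ p ∈ pvPairs,
    ((pvLetters.get? ((PySem.Int.ofStr?
        (PySem.Str.join "" ((List.replicate p.2 p.1).map PySem.Int.toStr))).getD 0)).getD "")
      = ((pvLetters.get? ((PySem.List.pyRange 0 (p.2 : Int) 1).foldl
            (fun code _ => code * 10 ^ (PySem.Str.len (PySem.Int.toStr p.1)).toNat + p.1) 0)).getD "") := by
  decide

theorem pv_pairs_facts : ∀ p ∈ pvPairs, p.1 ≠ 1 ∧ p.1 ≠ -1 ∧ 1 ≤ p.2 := by decide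

theorem pv_cutLen_le (v : Int) (n : Nat) : pvCutLen v n ≤ n := by
  unfold pvCutLen; split_ifs <;> first | exact Nat.mod_le _ _ | exact le_refl _

theorem pv_mod_natCast' (m k : Nat) :
    PySem.Int.mod ((m : Nat) : Int) (OfNat.ofNat k) = ((m % k : Nat) : Int) := by
  exact_mod_cast PySem.Int.mod_natCast m k

theorem pv_cut_replicate (v : Int) (n : Nat) (hn : 1 ≤ n) :
    pvCutCommand (List.replicate n v) = List.replicate (pvCutLen v n) v := by
  obtain ⟨m, rfl⟩ : ∃ m, n = m + 1 := ⟨n - 1, by omega⟩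
  have hget : (PySem.List.pyGet? (List.replicate (m + 1) v) 0).getD 0 = v := by
    rw [List.replicate_succ, PySem.List.pyGet?_zero_cons]; rfl
  have h4 : ((m + 1 : Nat) : Int) > 4 ↔ 4 < m + 1 := by exact_mod_cast Iff.rfl
  have h3 : ((m + 1 : Nat) : Int) > 3 ↔ 3 < m + 1 := by exact_mod_cast Iff.rfl
  simp only [pvCutCommand, pvCutLen, List.length_replicate, hget]
  split_ifs <;>
    first
      | tauto
      | rfl
      | rw [pv_mod_natCast' (m + 1) 4, PySem.List.slice_to_natCast,
            List.take_replicate, Nat.min_eq_left (Nat.mod_le _ _)]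
      | rw [pv_mod_natCast' (m + 1) 3, PySem.List.slice_to_natCast,
            List.take_replicate, Nat.min_eq_left (Nat.mod_le _ _)]

set_option maxHeartbeats 2000000 in
theorem pv_step_run (v : Int) (n : Nat)
    (h : (v = 1 ∧ n = 1) ∨ (v = -1 ∧ n = 1) ∨ (v, pvCutLen v n) ∈ pvPairs) :
    ∀ (cap : Bool) (msg : List String),
    pvStepA (cap, msg) (List.replicate n v) = pvFlush v n cap msg := by
  intro cap msg
  rcases h with ⟨rfl, rfl⟩ | ⟨rfl, rfl⟩ | hp
  · simp [pvStepA, pvFlush, List.replicate]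
  · simp [pvStepA, pvFlush, List.replicate]
  · obtain ⟨hv1, hvm1, hcut1⟩ := pv_pairs_facts _ hp
    have hn : 1 ≤ n := le_trans hcut1 (pv_cutLen_le v n)
    obtain ⟨m, rfl⟩ : ∃ m, n = m + 1 := ⟨n - 1, by omega⟩
    have hne1 : List.replicate (m + 1) v ≠ [1] := by
      simp only [List.replicate_succ, ne_eq, List.cons.injEq]; tauto
    have hnem1 : List.replicate (m + 1) v ≠ [-1] := by
      simp only [List.replicate_succ, ne_eq, List.cons.injEq]; tauto
    clear hcut1
    have hbn : (if ((m + 1 : Nat) : Int) > 4 ∧ (v = 7 ∨ v = 9) then PySem.Int.mod ((m + 1 : Nat) : Int) 4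
        else if ((m + 1 : Nat) : Int) > 3 ∧ v ≠ 7 ∧ v ≠ 9 then PySem.Int.mod ((m + 1 : Nat) : Int) 3
        else ((m + 1 : Nat) : Int)) = ((pvCutLen v (m + 1) : Nat) : Int) := by
      have h4 : ((m + 1 : Nat) : Int) > 4 ↔ 4 < m + 1 := by exact_mod_cast Iff.rfl
      have h3 : ((m + 1 : Nat) : Int) > 3 ↔ 3 < m + 1 := by exact_mod_cast Iff.rfl
      simp only [pvCutLen]
      split_ifs <;> tauto
    have hletter := pv_letters_agree _ hp
    simp only [pvStepA, if_neg hne1, if_pos hnem1, pv_cut_replicate v (m + 1) hn,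
      pvFlush, if_neg (fun hc : v = 1 ∧ m + 1 = 1 => hv1 hc.1),
      if_neg (fun hc : v = -1 ∧ m + 1 = 1 => hvm1 hc.1), hbn]
    simp only at hletter
    rw [hletter]

theorem pv_fold_runs (runs : List (Int × Nat))
    (h : ∀ p ∈ runs, (p.1 = 1 ∧ p.2 = 1) ∨ (p.1 = -1 ∧ p.2 = 1) ∨ (p.1, pvCutLen p.1 p.2) ∈ pvPairs) :
    ∀ (s : Bool × List String),
    (runs.map (fun p => List.replicate p.2 p.1)).foldl pvStepA s
      = runs.foldl (fun (s : Bool × List String) p => pvFlush p.1 p.2 s.1 s.2) s := by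
  induction runs with
  | nil => intro s; rfl
  | cons p ps ih =>
    intro s
    simp only [List.map_cons, List.foldl_cons]
    rw [pv_step_run p.1 p.2 (h p (by simp)) s.1 s.2]
    exact ih (fun q hq => h q (by simp [hq])) _

-- ===== VERDICT (by name: the statement is the Claim_ definition above) =====
theorem pv_main (pressed_sequence : List Int)
    (hpre : Pre_numbers_to_message pressed_sequence) :
    numbers_to_message pressed_sequence = numbers_to_message_alt pressed_sequence := by
  cases pressed_sequence with
  | nil => rfl
  | cons x xs =>
    unfold Pre_numbers_to_message at hpre
    show PySem.Str.join "" ((pvGroup (x :: xs)).foldl pvStepA (false, [])).2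
        = (let s := (x :: xs).foldl pvStepB (0, 0, false, [])
           let msg := if s.2.1 ≠ 0 then (pvFlush s.1 s.2.1 s.2.2.1 s.2.2.2).2 else s.2.2.2
           PySem.Str.join "" msg)
    have hB0 : pvStepB (0, 0, false, []) x = (x, 1, false, []) := by
      simp [pvStepB]
    simp only [List.foldl_cons, hB0]
    rw [pv_stream_invariant xs x 1 false [] (by omega)]
    rw [pv_group_eq]
    have hruns : pvRuns (x :: xs) = pvRunsAux x 1 xs := rfl
    rw [hruns] at hpre ⊢
    rw [pv_fold_runs (pvRunsAux x 1 xs) hpre (false, [])]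

-- ===== VERDICT (by name: the statement is the Claim_ definition above) =====
theorem numbers_to_message_spec : Claim_equal_numbers_to_message := by
  intro pressed_sequence _hdom hpre
  unfold Spec_numbers_to_message
  exact pv_main pressed_sequence hpre
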